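-- pv_equiv track=rewrite | github.com/steveya/trellis | trellis/agent/knowledge/import_registry.py | _merge_registry_snapshots
-- ===== SOURCE A (Python) =====
-- def _merge_registry_snapshots(
--     primary: dict[str, tuple[str, ...]],
--     fallback: dict[str, tuple[str, ...]],
-- ) -> dict[str, tuple[str, ...]]:
--     """Merge live and fallback registries, preserving live modules and exports.
--
--     The fallback registry carries a few compatibility re-exports that are not
--     discoverable via plain introspection, such as lazy ``__getattr__`` exports.
--     """
--     merged: dict[str, tuple[str, ...]] = {}
--     for module_path in sorted(set(primary) | set(fallback)):
--         symbols = set(primary.get(module_path, ()))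
--         symbols.update(fallback.get(module_path, ()))
--         if symbols:
--             merged[module_path] = tuple(sorted(symbols))
--     return merged
-- ===== SOURCE B (Python) =====
-- def _merge_registry_snapshots(
--     primary: dict[str, tuple[str, ...]],
--     fallback: dict[str, tuple[str, ...]],
-- ) -> dict[str, tuple[str, ...]]:
--     """Merge live and fallback registries, preserving live modules and exports."""
--     pairs = sorted({(module_path, symbol)
--                     for registry in (primary, fallback)
--                     for module_path, symbols in registry.items()
--                     for symbol in symbols})
--     merged: dict[str, tuple[str, ...]] = {}
--     for module_path, symbol in pairs:
--         merged[module_path] = merged.get(module_path, ()) + (symbol,)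
--     return merged
-- ===== Notes on version B (the rewrite author's own statement) =====
-- stated objective: alternative
-- what changed: B flattens both registries into (module_path, symbol) pairs, sorts the deduplicated pair set lexicographically once, and then groups consecutive pairs by key with a single appending pass, instead of scanning the sorted key-union and unioning/sorting a per-key symbol set for each key.
import Mathlib
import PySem

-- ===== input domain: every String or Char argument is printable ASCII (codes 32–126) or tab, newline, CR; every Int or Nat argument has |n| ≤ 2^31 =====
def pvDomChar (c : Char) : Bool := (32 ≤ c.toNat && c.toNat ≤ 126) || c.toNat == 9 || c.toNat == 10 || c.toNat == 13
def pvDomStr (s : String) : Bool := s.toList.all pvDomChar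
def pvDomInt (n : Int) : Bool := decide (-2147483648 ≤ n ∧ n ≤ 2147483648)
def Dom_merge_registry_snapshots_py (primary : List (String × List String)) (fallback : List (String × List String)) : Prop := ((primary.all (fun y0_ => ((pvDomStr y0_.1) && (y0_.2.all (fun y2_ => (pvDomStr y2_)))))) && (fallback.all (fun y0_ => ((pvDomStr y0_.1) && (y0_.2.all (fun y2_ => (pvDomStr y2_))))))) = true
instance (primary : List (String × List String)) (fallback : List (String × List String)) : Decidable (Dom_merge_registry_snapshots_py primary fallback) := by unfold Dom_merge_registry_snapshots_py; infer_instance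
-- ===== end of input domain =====

-- B flattens both registries into (key, symbol) pairs, sorts the deduplicated pairs once, and
-- groups them by key in a single appending pass — same results, similar cost (objective: alternative).

-- ===== PORT A =====
def merge_registry_snapshots_py (primary : List (String × List String)) (fallback : List (String × List String)) : List (String × List String) :=
  -- sorted(set(primary) | set(fallback)); iterating a dict yields its keys
  let dp := PySem.Dict.mk primary
  let df := PySem.Dict.mk fallback
  let keys := PySem.List.sorted
    (PySem.Set.union (PySem.Set.ofList (primary.map Prod.fst)) (PySem.Set.ofList (fallback.map Prod.fst)))
    (fun x => x) false
  let merged := keys.foldl (fun merged module_path =>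
      -- symbols = set(primary.get(k, ())); symbols.update(fallback.get(k, ()))
      let symbols := PySem.Set.update (PySem.Set.ofList (dp.getD module_path [])) (df.getD module_path [])
      if symbols ≠ [] then
        merged.insert module_path (PySem.List.sorted symbols (fun x => x) false)
      else merged)
    PySem.Dict.empty
  merged.items

-- ===== PORT B =====
-- pairs = sorted({(module_path, symbol) for registry in (primary, fallback)
--                 for module_path, symbols in registry.items() for symbol in symbols});
-- Python sorts the tuples lexicographically: sorted2 with the two components as keys
def merge_registry_snapshots_py_alt (primary : List (String × List String)) (fallback : List (String × List String)) : List (String × List String) :=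
  let pairs := PySem.List.sorted2
    (PySem.Set.ofList ((primary ++ fallback).flatMap (fun q => q.2.map (fun s => (q.1, s)))))
    Prod.fst Prod.snd false
  -- merged[module_path] = merged.get(module_path, ()) + (symbol,)
  let merged := pairs.foldl (fun m q => m.modify q.1 [] (fun t => t ++ [q.2])) PySem.Dict.empty
  merged.items

-- ===== PRECONDITION & SPEC =====
-- Pre_ requires the keys within each association list to be distinct: a Python dict cannot
-- contain duplicate keys, so duplicate-key lists represent no Python input of A at all.
def Pre_merge_registry_snapshots_py (primary : List (String × List String)) (fallback : List (String × List String)) : Prop :=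
  (primary.map Prod.fst).Nodup ∧ (fallback.map Prod.fst).Nodup
instance (primary : List (String × List String)) (fallback : List (String × List String)) : Decidable (Pre_merge_registry_snapshots_py primary fallback) := by unfold Pre_merge_registry_snapshots_py; infer_instance
def pvWitness_merge_registry_snapshots_py : (List (String × List String)) × (List (String × List String)) :=
  ([("a", ["y", "x"]), ("b", [])], [("a", ["z"]), ("c", ["w"])])
def Spec_merge_registry_snapshots_py (primary : List (String × List String)) (fallback : List (String × List String)) (out : List (String × List String)) : Prop := out = merge_registry_snapshots_py_alt primary fallback
instance (primary : List (String × List String)) (fallback : List (String × List String)) (out : List (String × List String)) : Decidable (Spec_merge_registry_snapshots_py primary fallback out) := by unfold Spec_merge_registry_snapshots_py; infer_instance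

-- ===== CLAIM (what is proved, stated in full; the proofs are below) =====
def Claim_equal_merge_registry_snapshots_py : Prop := ∀ (primary : List (String × List String)) (fallback : List (String × List String)), Dom_merge_registry_snapshots_py primary fallback → Pre_merge_registry_snapshots_py primary fallback → Spec_merge_registry_snapshots_py primary fallback (merge_registry_snapshots_py primary fallback)

-- ===== LEMMAS AND PROOFS =====

-- the union of the two symbol sets of one module path, and the canonical merged registry
-- both programs compute
def pvSyms (primary fallback : List (String × List String)) (k : String) : List String :=
  PySem.Set.update (PySem.Set.ofList ((PySem.Dict.mk primary).getD k [])) ((PySem.Dict.mk fallback).getD k [])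

def pvKeys (primary fallback : List (String × List String)) : List String :=
  (PySem.List.sorted
    (PySem.Set.union (PySem.Set.ofList (primary.map Prod.fst)) (PySem.Set.ofList (fallback.map Prod.fst)))
    (fun x => x) false).filter (fun k => decide (pvSyms primary fallback k ≠ []))

def pvCanon (primary fallback : List (String × List String)) : List (String × List String) :=
  (pvKeys primary fallback).map
    (fun k => (k, PySem.List.sorted (pvSyms primary fallback k) (fun x => x) false))

-- sorting pairs by the tuple key (fst, snd) is sorting by the lexicographic order on pairs
theorem pv_sorted2_eq_sorted_lex (xs : List (String × String)) :
    PySem.List.sorted2 xs Prod.fst Prod.snd false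
      = PySem.List.sorted xs (fun p => toLex p) false := by
  simp only [PySem.List.sorted, PySem.List.sorted2, if_neg (by decide : ¬ (false = true))]
  congr 1
  funext a x
  congr 1
  funext p q
  rcases p with ⟨p1, p2⟩; rcases q with ⟨q1, q2⟩
  simp only [Prod.Lex.lt_iff]
  rcases lt_trichotomy p1 q1 with h | h | h
  · simp [h]
  · simp [h]
  · simp [h, not_lt_of_gt h, ne_of_gt h]

-- membership in the flattened block list
theorem pv_mem_flatMap (ks : List String) (b : String → List String) (x : String × String) :
    x ∈ ks.flatMap (fun k => (b k).map (fun s => (k, s))) ↔ x.1 ∈ ks ∧ x.2 ∈ b x.1 := by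
  rcases x with ⟨k, s⟩
  simp only [List.mem_flatMap, List.mem_map, Prod.mk.injEq]
  constructor
  · rintro ⟨k', hk', s', hs', rfl, rfl⟩; exact ⟨hk', hs'⟩
  · rintro ⟨hk, hs⟩; exact ⟨k, hk, s, hs, rfl, rfl⟩

theorem pv_nodup_flatMap (ks : List String) (b : String → List String)
    (hk : ks.Nodup) (hb : ∀ k, (b k).Nodup) :
    (ks.flatMap (fun k => (b k).map (fun s => (k, s)))).Nodup := by
  induction ks with
  | nil => simp
  | cons k t ih =>
    simp only [List.nodup_cons] at hk
    simp only [List.flatMap_cons]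
    refine List.Nodup.append ((hb k).map (fun a a' h => by simpa using congrArg Prod.snd h)) (ih hk.2) ?_
    intro x hx hx'
    rw [List.mem_map] at hx
    obtain ⟨s, _, rfl⟩ := hx
    rw [pv_mem_flatMap] at hx'
    exact hk.1 hx'.1

theorem pv_pairwise_flatMap (ks : List String) (b : String → List String)
    (hk : ks.Pairwise (· < ·)) (hb : ∀ k, (b k).Pairwise (· < ·)) :
    (ks.flatMap (fun k => (b k).map (fun s => (k, s)))).Pairwise
      (fun p q => toLex p < toLex q) := by
  induction ks with
  | nil => simp
  | cons k t ih =>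
    simp only [List.pairwise_cons] at hk
    simp only [List.flatMap_cons, List.pairwise_append]
    refine ⟨?_, ih hk.2, ?_⟩
    · rw [List.pairwise_map]
      exact (hb k).imp (fun h => by simp [Prod.Lex.lt_iff, h])
    · intro x hx y hy
      rw [List.mem_map] at hx
      obtain ⟨s, _, rfl⟩ := hx
      rw [pv_mem_flatMap] at hy
      have : k < y.1 := hk.1 _ hy.1
      rcases y with ⟨k', s'⟩
      simp [Prod.Lex.lt_iff, this]

theorem pv_ofList_const_append (k : String) (l : List String) (hl : l ≠ []) (rest : List String) :
    PySem.Set.ofList (l.map (fun _ => k) ++ rest)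
      = k :: PySem.Set.discard (PySem.Set.ofList rest) k := by
  induction l with
  | nil => exact absurd rfl hl
  | cons a t ih =>
    rcases t with _ | ⟨a', t'⟩
    · simpa using PySem.Set.ofList_cons k rest
    · have := ih (by simp)
      simp only [List.map_cons, List.cons_append] at this ⊢
      rw [PySem.Set.ofList_cons, this]
      simp [PySem.Set.discard, List.filter]

theorem pv_ofList_map_fst (ks : List String) (b : String → List String)
    (hk : ks.Nodup) (hne : ∀ k ∈ ks, b k ≠ []) :
    PySem.Set.ofList ((ks.flatMap (fun k => (b k).map (fun s => (k, s)))).map Prod.fst) = ks := by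
  induction ks with
  | nil => simp [PySem.Set.ofList_nil]
  | cons k t ih =>
    simp only [List.nodup_cons] at hk
    simp only [List.flatMap_cons, List.map_append, List.map_map]
    rw [show (Prod.fst ∘ fun s : String => (k, s)) = (fun _ : String => k) from funext (fun _ => rfl)]
    rw [pv_ofList_const_append k (b k) (hne k (by simp)) _,
      ih hk.2 (fun k' hk' => hne k' (by simp [hk']))]
    congr 1
    exact List.filter_eq_self.mpr (fun k' hk' => by simpa using fun h : k' = k => hk.1 (h ▸ hk'))

theorem pv_filter_flatMap (ks : List String) (b : String → List String)
    (hk : ks.Nodup) (k : String) (hkmem : k ∈ ks) :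
    ((ks.flatMap (fun k => (b k).map (fun s => (k, s)))).filter
        (fun p => p.1 == k)).map Prod.snd = b k := by
  induction ks with
  | nil => simp at hkmem
  | cons k' t ih =>
    simp only [List.nodup_cons] at hk
    simp only [List.flatMap_cons, List.filter_append, List.map_append]
    by_cases h : k' = k
    · subst h
      have h1 : ((b k').map (fun s => (k', s))).filter (fun p => p.1 == k') = (b k').map (fun s => (k', s)) :=
        List.filter_eq_self.mpr (fun p hp => by rw [List.mem_map] at hp; obtain ⟨s, _, rfl⟩ := hp; simp)
      have h2 : (t.flatMap (fun k => (b k).map (fun s => (k, s)))).filter (fun p => p.1 == k') = [] := by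
        rw [List.filter_eq_nil_iff]
        intro p hp
        rw [pv_mem_flatMap] at hp
        simpa using fun h : p.1 = k' => hk.1 (h ▸ hp.1)
      simp [h1, h2]
    · have h1 : ((b k').map (fun s => (k', s))).filter (fun p => p.1 == k) = [] := by
        rw [List.filter_eq_nil_iff]
        intro p hp
        rw [List.mem_map] at hp; obtain ⟨s, _, rfl⟩ := hp; simpa using h
      have hkt : k ∈ t := by
        rcases List.mem_cons.mp hkmem with h' | h'
        · exact absurd h'.symm h
        · exact h'
      simp [h1, ih hk.2 hkt]

-- membership in a dict lookup, for a duplicate-free association list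
theorem pv_mem_getD_mk (l : List (String × List String)) (hl : (l.map Prod.fst).Nodup)
    (k : String) (s : String) :
    s ∈ (PySem.Dict.mk l).getD k [] ↔ ∃ q ∈ l, q.1 = k ∧ s ∈ q.2 := by
  constructor
  · intro h
    rcases hg : (PySem.Dict.mk l).get? k with _ | v
    · rw [PySem.Dict.getD_eq_get?_getD, hg] at h; simp at h
    · refine ⟨(k, v), PySem.Dict.mem_items_of_get?_eq_some _ hg, rfl, ?_⟩
      rwa [PySem.Dict.getD_eq_get?_getD, hg] at h
  · rintro ⟨⟨k', v⟩, hq, rfl, hs⟩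
    have hg := PySem.Dict.get?_of_mem_items (PySem.Dict.mk l) (k := k') (v := v) hq hl
    rw [PySem.Dict.getD_eq_get?_getD, hg]
    exact hs

theorem pv_mem_syms (primary fallback : List (String × List String))
    (hp : (primary.map Prod.fst).Nodup) (hf : (fallback.map Prod.fst).Nodup)
    (k : String) (s : String) :
    s ∈ pvSyms primary fallback k ↔ ∃ q ∈ primary ++ fallback, q.1 = k ∧ s ∈ q.2 := by
  unfold pvSyms
  rw [PySem.Set.mem_update, PySem.Set.mem_ofList, pv_mem_getD_mk _ hp, pv_mem_getD_mk _ hf]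
  constructor
  · rintro (⟨q, hq, hqs⟩ | ⟨q, hq, hqs⟩)
    · exact ⟨q, List.mem_append_left _ hq, hqs⟩
    · exact ⟨q, List.mem_append_right _ hq, hqs⟩
  · rintro ⟨q, hq, hqs⟩
    rcases List.mem_append.mp hq with h | h
    · exact Or.inl ⟨q, h, hqs⟩
    · exact Or.inr ⟨q, h, hqs⟩

theorem pv_keys_pairwise (primary fallback : List (String × List String)) :
    (pvKeys primary fallback).Pairwise (· < ·) := by
  unfold pvKeys
  have hnd : (PySem.List.sorted
      (PySem.Set.union (PySem.Set.ofList (primary.map Prod.fst)) (PySem.Set.ofList (fallback.map Prod.fst)))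
      (fun x => x) false).Nodup :=
    ((PySem.List.sorted_perm _ _ _).nodup_iff).mpr
      (PySem.Set.nodup_union _ _ (PySem.Set.nodup_ofList _))
  have hle := PySem.List.sorted_pairwise
    (PySem.Set.union (PySem.Set.ofList (primary.map Prod.fst)) (PySem.Set.ofList (fallback.map Prod.fst)))
    (fun x => x)
  exact ((hle.and hnd).imp (fun h => lt_of_le_of_ne h.1 h.2)).filter _

theorem pv_syms_eq_ofList (primary fallback : List (String × List String)) (k : String) :
    pvSyms primary fallback k
      = PySem.Set.ofList ((PySem.Dict.mk primary).getD k [] ++ (PySem.Dict.mk fallback).getD k []) := by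
  rw [PySem.Set.ofList_append]; rfl

theorem pv_block_pairwise (primary fallback : List (String × List String)) (k : String) :
    (PySem.List.sorted (pvSyms primary fallback k) (fun x => x) false).Pairwise (· < ·) := by
  rw [pv_syms_eq_ofList]
  exact PySem.List.sorted_ofList_pairwise_lt _

-- membership in pvKeys
theorem pv_mem_keys (primary fallback : List (String × List String))
    (hp : (primary.map Prod.fst).Nodup) (hf : (fallback.map Prod.fst).Nodup) (k : String) :
    k ∈ pvKeys primary fallback ↔ pvSyms primary fallback k ≠ [] := by
  unfold pvKeys
  rw [List.mem_filter, PySem.List.mem_sorted, decide_eq_true_iff]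
  constructor
  · exact fun h => h.2
  · intro h
    refine ⟨?_, h⟩
    obtain ⟨s, hs⟩ := List.exists_mem_of_ne_nil _ h
    obtain ⟨q, hq, hq1, _⟩ := (pv_mem_syms primary fallback hp hf k s).mp hs
    rw [PySem.Set.mem_union, PySem.Set.mem_ofList, PySem.Set.mem_ofList]
    rcases List.mem_append.mp hq with h' | h'
    · exact Or.inl (hq1 ▸ List.mem_map_of_mem h')
    · exact Or.inr (hq1 ▸ List.mem_map_of_mem h')

-- ----- the two programs both compute pvCanon -----

theorem pvA_eq_canon (primary fallback : List (String × List String)) :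
    merge_registry_snapshots_py primary fallback = pvCanon primary fallback := by
  unfold merge_registry_snapshots_py pvCanon pvKeys pvSyms
  simp only []
  rw [PySem.List.foldl_ite_eq_foldl_filter
    (p := fun module_path : String =>
      PySem.Set.update (PySem.Set.ofList ((PySem.Dict.mk primary).getD module_path []))
        ((PySem.Dict.mk fallback).getD module_path []) ≠ [])
    (f := fun (merged : PySem.Dict String (List String)) (module_path : String) =>
      merged.insert module_path
        (PySem.List.sorted
          (PySem.Set.update (PySem.Set.ofList ((PySem.Dict.mk primary).getD module_path []))
            ((PySem.Dict.mk fallback).getD module_path [])) (fun x => x) false))]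
  rw [PySem.Dict.items_foldl_insert_fresh _ (fun a => a) _ PySem.Dict.empty
    (fun a _ => PySem.Dict.contains_empty a)
    (by
      simp only [List.map_id']
      exact (((PySem.List.sorted_perm _ _ _).nodup_iff).mpr
        (PySem.Set.nodup_union _ _ (PySem.Set.nodup_ofList _))).filter _)]
  simp
  rfl

theorem pvB_eq_canon (primary fallback : List (String × List String))
    (hp : (primary.map Prod.fst).Nodup) (hf : (fallback.map Prod.fst).Nodup) :
    merge_registry_snapshots_py_alt primary fallback = pvCanon primary fallback := by
  have hkpw := pv_keys_pairwise primary fallback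
  have hknd : (pvKeys primary fallback).Nodup := hkpw.imp (fun h => ne_of_lt h)
  have hbpw : ∀ k, (PySem.List.sorted (pvSyms primary fallback k) (fun x => x) false).Pairwise (· < ·) :=
    pv_block_pairwise primary fallback
  have hbnd : ∀ k, (PySem.List.sorted (pvSyms primary fallback k) (fun x => x) false).Nodup :=
    fun k => (hbpw k).imp (fun h => ne_of_lt h)
  have hbne : ∀ k ∈ pvKeys primary fallback,
      PySem.List.sorted (pvSyms primary fallback k) (fun x => x) false ≠ [] := by
    intro k hk
    rw [Ne, PySem.List.sorted_eq_nil_iff]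
    exact (pv_mem_keys primary fallback hp hf k).mp hk
  set b : String → List String := fun k => PySem.List.sorted (pvSyms primary fallback k) (fun x => x) false with hb
  set L : List (String × String) :=
    (pvKeys primary fallback).flatMap (fun k => (b k).map (fun s => (k, s))) with hL
  have hmemL : ∀ x : String × String, x ∈ L ↔ x.2 ∈ pvSyms primary fallback x.1 := by
    intro x
    rw [hL, pv_mem_flatMap]
    constructor
    · rintro ⟨_, hs⟩
      rw [hb] at hs
      exact (PySem.List.mem_sorted _ _ _ _).mp hs
    · intro hs
      refine ⟨(pv_mem_keys primary fallback hp hf x.1).mpr (List.ne_nil_of_mem hs), ?_⟩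
      rw [hb]
      exact (PySem.List.mem_sorted _ _ _ _).mpr hs
  have hsorted : PySem.List.sorted2
      (PySem.Set.ofList ((primary ++ fallback).flatMap (fun q => q.2.map (fun s => (q.1, s)))))
      Prod.fst Prod.snd false = L := by
    rw [pv_sorted2_eq_sorted_lex]
    refine PySem.List.sorted_eq_of_perm_of_pairwise_lt _ _ _ ?_ ?_
    · rw [List.perm_ext_iff_of_nodup
        (pv_nodup_flatMap _ _ hknd hbnd) (PySem.Set.nodup_ofList _)]
      intro x
      rw [hmemL, PySem.Set.mem_ofList]
      rcases x with ⟨k, s⟩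
      rw [pv_mem_syms primary fallback hp hf]
      simp only [List.mem_flatMap, List.mem_map, Prod.mk.injEq]
      constructor
      · rintro ⟨q, hq, hq1, hqs⟩; exact ⟨q, hq, s, hqs, hq1, rfl⟩
      · rintro ⟨q, hq, s', hs', h1, h2⟩; exact ⟨q, hq, h1, h2 ▸ hs'⟩
    · exact pv_pairwise_flatMap _ _ hkpw hbpw
  unfold merge_registry_snapshots_py_alt
  simp only []
  rw [hsorted]
  have hknodup : (L.foldl (fun m q => m.modify q.1 [] (fun t => t ++ [q.2])) PySem.Dict.empty).keys.Nodup :=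
    PySem.Dict.nodup_keys_foldl_modify_key L Prod.fst [] (fun _ q => fun t => t ++ [q.2]) _
      (by simp [PySem.Dict.keys_empty])
  rw [PySem.Dict.items_eq_map_keys _ hknodup []]
  have hkeys : (L.foldl (fun m q => m.modify q.1 [] (fun t => t ++ [q.2])) PySem.Dict.empty).keys
      = pvKeys primary fallback := by
    rw [PySem.Dict.keys_foldl_modify_key L Prod.fst [] (fun _ q => fun t => t ++ [q.2])]
    rw [PySem.Dict.keys_empty]
    exact pv_ofList_map_fst _ _ hknd hbne
  rw [hkeys]
  unfold pvCanon
  refine List.map_congr_left ?_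
  intro k hk
  rw [PySem.Dict.getD_foldl_modify_append L PySem.Dict.empty k, PySem.Dict.getD_empty,
    List.nil_append, hL, pv_filter_flatMap _ _ hknd k hk]

-- ===== VERDICT (by name: the statement is the Claim_ definition above) =====
theorem merge_registry_snapshots_py_spec : Claim_equal_merge_registry_snapshots_py := by
  intro primary fallback _hdom hpre
  unfold Spec_merge_registry_snapshots_py
  rw [pvA_eq_canon, pvB_eq_canon primary fallback hpre.1 hpre.2]
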